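-- pv_equiv track=rewrite | github.com/yahya6-dev/Challenges | twitter.py | find_group
-- ===== SOURCE A (Python) =====
-- def find_group(D):
-- 	keys = list(D.keys())
-- 	results = []
--
-- 	for index in range(len(keys)):
-- 		key = keys[index]
-- 		result = D[key] + [key]
-- 		flag = False
--
-- 		for friends_group in results:
-- 			if key in friends_group:
-- 				flag = True
-- 				break
-- 			else:
-- 				flag = False
--
-- 		if flag: continue
-- 		for index2 in range(index,len(keys)):
-- 			key2 = keys[index2]
-- 			friends = D[key2]
--
-- 			if key in friends:
-- 				for friend in friends:
-- 					if friend not in result: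
-- 						result.append(friend)
-- 		results.append(result)
--
-- 	return results
-- ===== SOURCE B (Python) =====
-- def find_group(D):
-- 	keys = list(D.keys())
-- 	# inverted index: member value -> ascending list of key positions whose friend list contains it
-- 	inv = {}
-- 	for i in range(len(keys)):
-- 		for f in dict.fromkeys(D[keys[i]]):
-- 			inv.setdefault(f, []).append(i)
-- 	seen = set()
-- 	results = []
-- 	for i in range(len(keys)):
-- 		k = keys[i]
-- 		if k in seen:
-- 			continue
-- 		group = D[k] + [k]
-- 		members = set(group)
-- 		for j in inv.get(k, []):
-- 			if j >= i:
-- 				for f in D[keys[j]]: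
-- 					if f not in members:
-- 						group.append(f)
-- 						members.add(f)
-- 		results.append(group)
-- 		seen.update(group)
-- 	return results
-- ===== Notes on version B (the rewrite author's own statement) =====
-- stated objective: faster
-- what changed: Replaces A's per-key rescans (inner scan of all later keys with 'key in friends', membership tests against the growing result list, and a scan of all previous groups) with a precomputed inverted index member->ascending key positions plus a seen-members set and a per-group member set, so each key's group is built from exactly the relevant positions.
import Mathlib
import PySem

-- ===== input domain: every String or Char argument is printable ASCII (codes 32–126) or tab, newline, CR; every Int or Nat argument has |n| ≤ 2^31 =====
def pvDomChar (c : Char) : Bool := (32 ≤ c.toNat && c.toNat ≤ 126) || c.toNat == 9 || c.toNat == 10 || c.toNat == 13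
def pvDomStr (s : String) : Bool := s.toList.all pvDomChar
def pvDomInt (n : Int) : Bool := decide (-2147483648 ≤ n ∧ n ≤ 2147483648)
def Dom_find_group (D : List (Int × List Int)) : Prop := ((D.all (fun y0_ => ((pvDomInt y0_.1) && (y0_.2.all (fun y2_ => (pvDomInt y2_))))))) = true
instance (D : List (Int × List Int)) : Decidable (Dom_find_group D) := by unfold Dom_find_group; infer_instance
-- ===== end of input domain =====

-- B replaces A's quadratic rescans with a precomputed inverted index (member -> ascending key
-- positions) plus member/seen sets; measured faster on the timing inputs.

-- ===== PORT A =====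
-- Python A; the 'for friends_group in results: … break' loop computes exactly
-- 'any(key in g for g in results)', ported as List.any.
def find_group (D : List (Int × List Int)) : List (List Int) :=
  let d := PySem.Dict.ofList D
  let keys := d.keys
  (PySem.List.pyRange 0 (keys.length : Int) 1).foldl (fun results index =>
    let key := PySem.List.pyGetD keys index 0
    let result := d.getD key [] ++ [key]
    let flag := results.any (fun g => decide (key ∈ g))
    if flag then results
    else
      let result := (PySem.List.pyRange index (keys.length : Int) 1).foldl (fun result index2 =>
        let key2 := PySem.List.pyGetD keys index2 0
        let friends := d.getD key2 []
        if key ∈ friends then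
          friends.foldl (fun result friend =>
            if friend ∈ result then result else result ++ [friend]) result
        else result) result
      results ++ [result]) []

-- ===== PORT B =====
def find_group_alt (D : List (Int × List Int)) : List (List Int) :=
  let d := PySem.Dict.ofList D
  let keys := d.keys
  let inv : PySem.Dict Int (List Int) := (PySem.List.pyRange 0 (keys.length : Int) 1).foldl
    (fun inv i =>
      (PySem.List.dedup (d.getD (PySem.List.pyGetD keys i 0) [])).foldl
        (fun inv f => inv.modify f [] (· ++ [i])) inv)
    PySem.Dict.empty
  let st := (PySem.List.pyRange 0 (keys.length : Int) 1).foldl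
    (fun (st : PySem.Set Int × List (List Int)) i =>
      let k := PySem.List.pyGetD keys i 0
      if k ∈ st.1 then st
      else
        let group := d.getD k [] ++ [k]
        let members := PySem.Set.ofList group
        let gm := (inv.getD k []).foldl
          (fun (gm : List Int × PySem.Set Int) j =>
            if i ≤ j then
              (d.getD (PySem.List.pyGetD keys j 0) []).foldl
                (fun gm f => if f ∈ gm.2 then gm else (gm.1 ++ [f], PySem.Set.add gm.2 f)) gm
            else gm)
          (group, members)
        (PySem.Set.update st.1 gm.1, st.2 ++ [gm.1]))
    (PySem.Set.empty, [])
  st.2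

-- ===== PRECONDITION & SPEC =====
def Spec_find_group (D : List (Int × List Int)) (out : List (List Int)) : Prop := out = find_group_alt D
instance (D : List (Int × List Int)) (out : List (List Int)) : Decidable (Spec_find_group D out) := by unfold Spec_find_group; infer_instance

-- ===== CLAIM (what is proved, stated in full; the proofs are below) =====
def Claim_equal_find_group : Prop := ∀ (D : List (Int × List Int)), Dom_find_group D → Spec_find_group D (find_group D)

-- ===== LEMMAS AND PROOFS =====

-- a nested 'setdefault(...).append' loop is one flat modify-loop over (value, position) pairs
theorem pvFlattenFold (g : Int → List Int) (l : List Int) :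
    ∀ (acc : PySem.Dict Int (List Int)),
    l.foldl (fun inv i => (g i).foldl (fun inv f => inv.modify f [] (· ++ [i])) inv) acc
      = (l.flatMap (fun i => (g i).map (fun f => (f, i)))).foldl
          (fun inv p => inv.modify p.1 [] (· ++ [p.2])) acc := by
  induction l with
  | nil => intro acc; rfl
  | cons i l ih =>
    intro acc
    simp only [List.flatMap_cons, List.foldl_append, List.foldl_cons, List.foldl_map]
    exact ih _

theorem pvFlatMapIf (l : List Int) (p : Int → Prop) [DecidablePred p] :
    l.flatMap (fun i => if p i then [i] else []) = l.filter (fun i => decide (p i)) := by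
  induction l with
  | nil => rfl
  | cons i l ih => by_cases h : p i <;> simp [h, ih]

-- B's (group, member-set) fold computes A's dedup-append fold, and the set tracks the list
theorem pvPairFold (fs : List Int) : ∀ (r : List Int) (s : PySem.Set Int),
    (∀ x, x ∈ s ↔ x ∈ r) →
    (fs.foldl (fun gm f => if f ∈ gm.2 then gm else (gm.1 ++ [f], PySem.Set.add gm.2 f)) (r, s)).1
        = fs.foldl (fun r f => if f ∈ r then r else r ++ [f]) r ∧
      (∀ x, x ∈ (fs.foldl (fun gm f => if f ∈ gm.2 then gm else (gm.1 ++ [f], PySem.Set.add gm.2 f)) (r, s)).2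
        ↔ x ∈ fs.foldl (fun r f => if f ∈ r then r else r ++ [f]) r) := by
  induction fs with
  | nil => intro r s h; exact ⟨rfl, h⟩
  | cons f fs ih =>
    intro r s h
    simp only [List.foldl_cons]
    by_cases hf : f ∈ r
    · rw [if_pos ((h f).2 hf), if_pos hf]
      exact ih r s h
    · rw [if_neg (fun hs => hf ((h f).1 hs)), if_neg hf]
      exact ih (r ++ [f]) (PySem.Set.add s f)
        (fun x => by simp [PySem.Set.mem_add, h x, List.mem_append])

theorem pvChainFold (d : PySem.Dict Int (List Int)) (keys : List Int) (js : List Int) :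
    ∀ (r : List Int) (s : PySem.Set Int), (∀ x, x ∈ s ↔ x ∈ r) →
    (js.foldl (fun gm j => (d.getD (PySem.List.pyGetD keys j 0) []).foldl
        (fun gm f => if f ∈ gm.2 then gm else (gm.1 ++ [f], PySem.Set.add gm.2 f)) gm) (r, s)).1
      = js.foldl (fun r j => (d.getD (PySem.List.pyGetD keys j 0) []).foldl
        (fun r f => if f ∈ r then r else r ++ [f]) r) r := by
  induction js with
  | nil => intro r s _; rfl
  | cons j js ih =>
    intro r s h
    simp only [List.foldl_cons]
    obtain ⟨h1, h2⟩ := pvPairFold (d.getD (PySem.List.pyGetD keys j 0) []) r s h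
    exact (ih _ _ (fun x => by rw [h1]; exact h2 x)).trans (by rw [h1])

-- the inverted index read back: inv[k] is the ascending list of positions whose friend list contains k
theorem pvInvSpec (d : PySem.Dict Int (List Int)) (keys : List Int) (k : Int) :
    (((PySem.List.pyRange 0 (keys.length : Int) 1).foldl
        (fun inv i =>
          (PySem.List.dedup (d.getD (PySem.List.pyGetD keys i 0) [])).foldl
            (fun inv f => inv.modify f [] (· ++ [i])) inv)
        PySem.Dict.empty).getD k [])
      = (PySem.List.pyRange 0 (keys.length : Int) 1).filter
          (fun j => decide (k ∈ d.getD (PySem.List.pyGetD keys j 0) [])) := by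
  have hblock : ∀ (fs : List Int) (i : Int),
      (((PySem.List.dedup fs).map (fun f => (f, i))).filter (fun p => p.1 == k)).map (fun p => p.2)
        = if k ∈ fs then [i] else [] := by
    intro fs i
    have h1 : ((PySem.List.dedup fs).map (fun f => (f, i))).filter (fun p => p.1 == k)
        = ((PySem.List.dedup fs).filter (fun f => f == k)).map (fun f => (f, i)) := by
      rw [List.filter_map]; rfl
    have h2 : (PySem.List.dedup fs).filter (fun f => f == k) = if k ∈ fs then [k] else [] := by
      rw [List.filter_beq]
      by_cases hk : k ∈ fs
      · rw [List.count_eq_one_of_mem (PySem.List.nodup_dedup fs) ((PySem.List.mem_dedup fs k).2 hk)]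
        simp [hk]
      · rw [List.count_eq_zero.2 (fun hm => hk ((PySem.List.mem_dedup fs k).1 hm))]
        simp [hk]
    rw [h1, h2]
    by_cases hk : k ∈ fs <;> simp [hk]
  rw [pvFlattenFold (fun i => PySem.List.dedup (d.getD (PySem.List.pyGetD keys i 0) []))]
  rw [PySem.Dict.getD_foldl_modify_append, PySem.Dict.getD_empty, List.nil_append]
  rw [List.filter_flatMap, List.map_flatMap]
  simp only [hblock]
  exact pvFlatMapIf _ _

theorem pvFilterSplit (d : PySem.Dict Int (List Int)) (keys : List Int) (k i : Int)
    (h0 : 0 ≤ i) (hn : i ≤ (keys.length : Int)) :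
    ((PySem.List.pyRange 0 (keys.length : Int) 1).filter
        (fun j => decide (k ∈ d.getD (PySem.List.pyGetD keys j 0) []))).filter
        (fun j => decide (i ≤ j))
      = (PySem.List.pyRange i (keys.length : Int) 1).filter
          (fun j => decide (k ∈ d.getD (PySem.List.pyGetD keys j 0) [])) := by
  rw [PySem.List.pyRange_one_append 0 i (keys.length : Int) h0 hn]
  rw [List.filter_append, List.filter_append]
  have h1 : ((PySem.List.pyRange 0 i 1).filter
      (fun j => decide (k ∈ d.getD (PySem.List.pyGetD keys j 0) []))).filter
      (fun j => decide (i ≤ j)) = [] := by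
    rw [List.filter_eq_nil_iff]
    intro j hj
    have hj' : j ∈ PySem.List.pyRange 0 i 1 := List.mem_of_mem_filter hj
    have := PySem.List.mem_pyRange_one.1 hj'
    simp only [decide_eq_true_eq]
    omega
  have h2 : ((PySem.List.pyRange i (keys.length : Int) 1).filter
      (fun j => decide (k ∈ d.getD (PySem.List.pyGetD keys j 0) []))).filter
      (fun j => decide (i ≤ j))
      = (PySem.List.pyRange i (keys.length : Int) 1).filter
          (fun j => decide (k ∈ d.getD (PySem.List.pyGetD keys j 0) [])) := by
    rw [List.filter_eq_self]
    intro j hj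
    have hj' : j ∈ PySem.List.pyRange i (keys.length : Int) 1 := List.mem_of_mem_filter hj
    have := PySem.List.mem_pyRange_one.1 hj'
    simp only [decide_eq_true_eq]
    omega
  rw [h1, h2, List.nil_append]

-- the main loop: seen is at all times the union of the groups produced so far
theorem pvMain (d : PySem.Dict Int (List Int)) (keys : List Int)
    (inv : PySem.Dict Int (List Int))
    (hinv : ∀ k, inv.getD k []
      = (PySem.List.pyRange 0 (keys.length : Int) 1).filter
          (fun j => decide (k ∈ d.getD (PySem.List.pyGetD keys j 0) []))) :
    ∀ (cnt : Nat) (i : Int), 0 ≤ i → i + cnt = (keys.length : Int) →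
    ∀ (results : List (List Int)) (seen : PySem.Set Int),
    (∀ x, x ∈ seen ↔ ∃ g ∈ results, x ∈ g) →
    (PySem.List.pyRange i (keys.length : Int) 1).foldl (fun results index =>
        let key := PySem.List.pyGetD keys index 0
        let result := d.getD key [] ++ [key]
        let flag := results.any (fun g => decide (key ∈ g))
        if flag then results
        else
          let result := (PySem.List.pyRange index (keys.length : Int) 1).foldl (fun result index2 =>
            let key2 := PySem.List.pyGetD keys index2 0
            let friends := d.getD key2 []
            if key ∈ friends then
              friends.foldl (fun result friend =>
                if friend ∈ result then result else result ++ [friend]) result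
            else result) result
          results ++ [result]) results
      = ((PySem.List.pyRange i (keys.length : Int) 1).foldl
          (fun (st : PySem.Set Int × List (List Int)) i =>
            let k := PySem.List.pyGetD keys i 0
            if k ∈ st.1 then st
            else
              let group := d.getD k [] ++ [k]
              let members := PySem.Set.ofList group
              let gm := (inv.getD k []).foldl
                (fun (gm : List Int × PySem.Set Int) j =>
                  if i ≤ j then
                    (d.getD (PySem.List.pyGetD keys j 0) []).foldl
                      (fun gm f => if f ∈ gm.2 then gm else (gm.1 ++ [f], PySem.Set.add gm.2 f)) gm
                  else gm)
                (group, members)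
              (PySem.Set.update st.1 gm.1, st.2 ++ [gm.1])) (seen, results)).2 := by
  intro cnt
  induction cnt with
  | zero =>
    intro i h0 hn results seen hseen
    rw [PySem.List.pyRange_one_eq_nil (by omega)]
    rfl
  | succ cnt ih =>
    intro i h0 hn results seen hseen
    rw [PySem.List.pyRange_one_cons (show i < (keys.length : Int) by omega)]
    simp only [List.foldl_cons]
    by_cases hmem : PySem.List.pyGetD keys i 0 ∈ seen
    · have hflag : (results.any (fun g => decide (PySem.List.pyGetD keys i 0 ∈ g))) = true := by
        rw [List.any_eq_true]
        obtain ⟨g, hg, hkg⟩ := (hseen _).1 hmem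
        exact ⟨g, hg, by simpa using hkg⟩
      rw [if_pos hflag, if_pos hmem]
      exact ih (i + 1) (by omega) (by omega) results seen hseen
    · have hflag : ¬ ((results.any (fun g => decide (PySem.List.pyGetD keys i 0 ∈ g))) = true) := by
        rw [List.any_eq_true]
        rintro ⟨g, hg, hkg⟩
        exact hmem ((hseen _).2 ⟨g, hg, by simpa using hkg⟩)
      rw [if_neg hflag, if_neg hmem]
      have hgm : ((inv.getD (PySem.List.pyGetD keys i 0) []).foldl
            (fun (gm : List Int × PySem.Set Int) j =>
              if i ≤ j then
                (d.getD (PySem.List.pyGetD keys j 0) []).foldl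
                  (fun gm f => if f ∈ gm.2 then gm else (gm.1 ++ [f], PySem.Set.add gm.2 f)) gm
              else gm)
            (d.getD (PySem.List.pyGetD keys i 0) [] ++ [PySem.List.pyGetD keys i 0],
             PySem.Set.ofList (d.getD (PySem.List.pyGetD keys i 0) [] ++ [PySem.List.pyGetD keys i 0]))).1
          = (PySem.List.pyRange i (keys.length : Int) 1).foldl (fun result index2 =>
              if PySem.List.pyGetD keys i 0 ∈ d.getD (PySem.List.pyGetD keys index2 0) [] then
                (d.getD (PySem.List.pyGetD keys index2 0) []).foldl
                  (fun result friend =>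
                    if friend ∈ result then result else result ++ [friend]) result
              else result)
              (d.getD (PySem.List.pyGetD keys i 0) [] ++ [PySem.List.pyGetD keys i 0]) := by
        rw [hinv]
        rw [PySem.List.foldl_ite_eq_foldl_filter
              (p := fun j => i ≤ j)
              (f := fun (gm : List Int × PySem.Set Int) j =>
                (d.getD (PySem.List.pyGetD keys j 0) []).foldl
                  (fun gm f => if f ∈ gm.2 then gm else (gm.1 ++ [f], PySem.Set.add gm.2 f)) gm)]
        rw [pvFilterSplit d keys _ i h0 (by omega)]
        rw [pvChainFold d keys _ _ _ (fun x => PySem.Set.mem_ofList _ x)]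
        rw [PySem.List.foldl_ite_eq_foldl_filter
              (p := fun index2 => PySem.List.pyGetD keys i 0 ∈ d.getD (PySem.List.pyGetD keys index2 0) [])
              (f := fun (result : List Int) j =>
                (d.getD (PySem.List.pyGetD keys j 0) []).foldl
                  (fun result friend =>
                    if friend ∈ result then result else result ++ [friend]) result)]
      rw [hgm]
      refine ih (i + 1) (by omega) (by omega) _ _ (fun x => ?_)
      simp only [PySem.Set.mem_update, hseen x, List.mem_append, List.mem_singleton]
      constructor
      · rintro (⟨g, hg, hxg⟩ | hx)
        · exact ⟨g, Or.inl hg, hxg⟩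
        · exact ⟨_, Or.inr rfl, hx⟩
      · rintro ⟨g, hg | rfl, hxg⟩
        · exact Or.inl ⟨g, hg, hxg⟩
        · exact Or.inr hxg

-- ===== VERDICT (by name: the statement is the Claim_ definition above) =====
theorem find_group_spec : Claim_equal_find_group := by
  intro D _
  unfold Spec_find_group find_group find_group_alt
  exact pvMain (PySem.Dict.ofList D) (PySem.Dict.ofList D).keys _ (fun k => pvInvSpec _ _ k)
    (PySem.Dict.ofList D).keys.length 0 le_rfl (by simp) [] PySem.Set.empty
    (by simp [PySem.Set.empty])
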